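-- pv_equiv track=rewrite | github.com/benotargiacomo/trybe-cs | restaurant-orders/src/analyze_log.py | most_requested_by_name
-- ===== SOURCE A (Python) =====
-- def most_requested_by_name(name, orders):
--     food_count = dict()
--
--     for order in orders:
--         if name in order:
--             food = order.split(",")[1]
--             if food not in food_count:
--                 food_count[food] = 1
--             else:
--                 food_count[food] += 1
--
--     return max(food_count, key=food_count.get)
-- ===== SOURCE B (Python) =====
-- def most_requested_by_name(name, orders):
--     foods = [order.split(",")[1] for order in orders if name in order]
--     best_food, best_count = foods[0], 0
--     while foods:
--         head = foods[0]
--         rest = [f for f in foods if f != head]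
--         count = len(foods) - len(rest)
--         if count > best_count:
--             best_food, best_count = head, count
--         foods = rest
--     return best_food
-- ===== Notes on version B (the rewrite author's own statement) =====
-- stated objective: alternative
-- what changed: Replaces the count dictionary plus max-by-count with a successive-extraction loop: each round takes the first remaining food, removes all its occurrences (its count = the length drop), and keeps it as the answer only if its count strictly beats the best so far.
import Mathlib
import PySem

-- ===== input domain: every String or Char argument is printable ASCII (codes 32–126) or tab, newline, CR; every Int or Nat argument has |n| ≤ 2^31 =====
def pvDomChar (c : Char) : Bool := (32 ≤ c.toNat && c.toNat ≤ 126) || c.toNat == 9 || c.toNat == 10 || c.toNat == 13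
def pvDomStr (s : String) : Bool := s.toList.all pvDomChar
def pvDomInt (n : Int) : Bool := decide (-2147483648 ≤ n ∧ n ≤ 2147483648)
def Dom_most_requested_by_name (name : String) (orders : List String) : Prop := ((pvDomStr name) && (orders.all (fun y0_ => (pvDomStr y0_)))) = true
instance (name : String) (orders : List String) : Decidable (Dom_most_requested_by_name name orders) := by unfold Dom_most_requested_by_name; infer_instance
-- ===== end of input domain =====

-- B drops A's count dictionary: a successive-extraction loop takes each first remaining food,
-- removes all its copies (count = length drop), and keeps it only if it strictly beats the best
-- so far; same return value (neither version mutates its arguments).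


-- ===== PORT A =====
-- order.split(",")[1]: split? is `some` because the separator "," is nonempty; the index-1
-- access raises IndexError in Python when the matching order has no comma — Pre_ excludes
-- that, so the `getD`/`pyGetD` defaults are never reached on admitted inputs.
def pvFood (order : String) : String :=
  PySem.List.pyGetD ((PySem.Str.split? order ",").getD []) 1 ""

def most_requested_by_name (name : String) (orders : List String) : String :=
  let food_count : PySem.Dict String Int :=
    orders.foldl (fun d order =>
      if PySem.Str.isIn name order then
        let food := pvFood order
        if d.contains food = false then d.insert food 1
        else d.insert food (d.getD food 0 + 1)
      else d) PySem.Dict.empty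
  -- max(food_count, key=food_count.get): first key attaining the maximal count
  -- (raises ValueError on an empty dict — excluded by Pre_, default "" unreachable there)
  (PySem.List.max? food_count.keys (fun k => food_count.getD k 0)).getD ""

-- ===== PORT B =====
-- the while-loop of Source B: state (foods, best_food, best_count); each round removes every
-- occurrence of the current head and keeps it as best only on a strictly larger count
def pvBestLoop : List String → String → Nat → String
  | [], bf, _ => bf
  | h :: t, bf, bc =>
    let rest := (h :: t).filter (fun f => f ≠ h)
    let c := (h :: t).length - rest.length
    if c > bc then pvBestLoop rest h c else pvBestLoop rest bf bc
termination_by fs => fs.length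
decreasing_by
  all_goals
    simp only [List.filter_cons, decide_not, ne_eq, List.length_cons]
    exact Nat.lt_succ_of_le (List.length_filter_le _ _)

def most_requested_by_name_alt (name : String) (orders : List String) : String :=
  let foods := (orders.filter (fun order => PySem.Str.isIn name order)).map pvFood
  -- foods[0] raises IndexError on an empty list in Python — excluded by Pre_, default "" unreachable
  pvBestLoop foods (PySem.List.pyGetD foods 0 "") 0

-- ===== PRECONDITION & SPEC =====
-- Pre_ excludes exactly the inputs where Python A raises: no order containing `name`
-- (ValueError from max over an empty dict; B's foods[0] raises IndexError there too) or a
-- matching order without a comma (IndexError from split(",")[1] in both).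
def Pre_most_requested_by_name (name : String) (orders : List String) : Prop :=
  (orders.any (fun o => PySem.Str.isIn name o)) = true ∧
  ∀ o ∈ orders, PySem.Str.isIn name o = true → PySem.Str.isIn "," o = true
instance (name : String) (orders : List String) : Decidable (Pre_most_requested_by_name name orders) := by unfold Pre_most_requested_by_name; infer_instance

def pvWitness_most_requested_by_name : String × List String :=
  ("Maria", ["Maria,pizza", "Jo,soup", "Maria,pie", "Maria,pizza"])

def Spec_most_requested_by_name (name : String) (orders : List String) (out : String) : Prop := out = most_requested_by_name_alt name orders
instance (name : String) (orders : List String) (out : String) : Decidable (Spec_most_requested_by_name name orders out) := by unfold Spec_most_requested_by_name; infer_instance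

-- ===== CLAIM (what is proved, stated in full; the proofs are below) =====
def Claim_equal_most_requested_by_name : Prop := ∀ (name : String) (orders : List String), Dom_most_requested_by_name name orders → Pre_most_requested_by_name name orders → Spec_most_requested_by_name name orders (most_requested_by_name name orders)

-- ===== LEMMAS AND PROOFS =====

-- the running-max step of PySem.List.max?
def pvStep {α κ : Type} [LT κ] [DecidableLT κ] (key : α → κ) (acc : Option α) (x : α) : Option α :=
  match acc with
  | none => some x
  | some m => if key m < key x then some x else some m

lemma max?_eq_foldl_pvStep {α κ : Type} [LT κ] [DecidableLT κ] (xs : List α) (key : α → κ) :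
    PySem.List.max? xs key = xs.foldl (pvStep key) none := rfl

-- ordered dedup relative to an already-seen set (membership only)
def pvDedupFrom {α : Type} [DecidableEq α] (s : List α) : List α → List α
  | [] => []
  | x :: t => if x ∈ s then pvDedupFrom s t else x :: pvDedupFrom (x :: s) t

lemma pvDedupFrom_congr {α : Type} [DecidableEq α] (l : List α) :
    ∀ (s s' : List α), (∀ a, a ∈ s ↔ a ∈ s') → pvDedupFrom s l = pvDedupFrom s' l := by
  induction l with
  | nil => intro s s' _; rfl
  | cons x t ih =>
    intro s s' h
    simp only [pvDedupFrom]
    by_cases hx : x ∈ s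
    · rw [if_pos hx, if_pos ((h x).1 hx)]; exact ih s s' h
    · rw [if_neg hx, if_neg (fun hx' => hx ((h x).2 hx'))]
      have := ih (x :: s) (x :: s') (by intro a; simp [h a])
      rw [this]

-- Set.ofList (first-insertion-order dedup) computed by pvDedupFrom
lemma foldl_add_eq_append_pvDedupFrom {α : Type} [DecidableEq α] (l : List α) :
    ∀ (s : List α), l.foldl PySem.Set.add s = s ++ pvDedupFrom s l := by
  induction l with
  | nil => intro s; simp [pvDedupFrom]
  | cons x t ih =>
    intro s
    simp only [List.foldl_cons, pvDedupFrom]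
    by_cases hx : x ∈ s
    · rw [if_pos hx]
      have : PySem.Set.add s x = s := by
        simp [PySem.Set.add, PySem.Set.contains, hx]
      rw [this]; exact ih s
    · rw [if_neg hx]
      have : PySem.Set.add s x = s ++ [x] := by
        simp [PySem.Set.add, PySem.Set.contains, hx]
      rw [this, ih (s ++ [x]),
        pvDedupFrom_congr t (s ++ [x]) (x :: s) (by intro a; simp; tauto)]
      simp

lemma ofList_eq_pvDedupFrom {α : Type} [DecidableEq α] (l : List α) :
    PySem.Set.ofList l = pvDedupFrom [] l := by
  rw [PySem.Set.ofList_eq_foldl, foldl_add_eq_append_pvDedupFrom l []]; rfl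

-- duplicates are no-ops for the running max: an element already bounded by the
-- accumulator never replaces it, so folding over the dedup gives the same result
lemma foldl_pvStep_pvDedupFrom {α κ : Type} [DecidableEq α] [LinearOrder κ] (key : α → κ)
    (l : List α) : ∀ (s : List α) (acc : Option α),
    (∀ y ∈ s, ∃ m, acc = some m ∧ key y ≤ key m) →
    (pvDedupFrom s l).foldl (pvStep key) acc = l.foldl (pvStep key) acc := by
  induction l with
  | nil => intro s acc _; rfl
  | cons x t ih =>
    intro s acc hR
    simp only [pvDedupFrom, List.foldl_cons]
    by_cases hx : x ∈ s
    · rw [if_pos hx]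
      obtain ⟨m, hm, hle⟩ := hR x hx
      have hstep : pvStep key acc x = acc := by
        subst hm; simp [pvStep, not_lt_of_ge hle]
      rw [hstep]
      exact ih s acc hR
    · rw [if_neg hx]
      simp only [List.foldl_cons]
      apply ih (x :: s) (pvStep key acc x)
      intro y hy
      cases acc with
      | none =>
        simp only [pvStep]
        rcases List.mem_cons.1 hy with h | h
        · exact ⟨x, rfl, by rw [h]⟩
        · exact absurd (hR y h) (by simp)
      | some m =>
        simp only [pvStep]
        by_cases hlt : key m < key x
        · rw [if_pos hlt]
          rcases List.mem_cons.1 hy with h | h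
          · exact ⟨x, rfl, by rw [h]⟩
          · obtain ⟨m', hm', hle⟩ := hR y h
            exact ⟨x, rfl, le_of_lt (lt_of_le_of_lt (by cases hm'; exact hle) hlt)⟩
        · rw [if_neg hlt]
          rcases List.mem_cons.1 hy with h | h
          · exact ⟨m, rfl, by rw [h]; exact le_of_not_gt hlt⟩
          · obtain ⟨m', hm', hle⟩ := hR y h
            exact ⟨m, rfl, by cases hm'; exact hle⟩

-- first maximum over the ordered dedup = first maximum over the list itself
lemma max?_ofList {α κ : Type} [DecidableEq α] [LinearOrder κ] (key : α → κ) (l : List α) :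
    PySem.List.max? (PySem.Set.ofList l) key = PySem.List.max? l key := by
  rw [max?_eq_foldl_pvStep, max?_eq_foldl_pvStep, ofList_eq_pvDedupFrom]
  exact foldl_pvStep_pvDedupFrom key l [] none (by simp)

-- a Nat-valued key may be compared through its Int cast
lemma foldl_pvStep_natCast {α : Type} (k : α → Nat) (l : List α) :
    ∀ (acc : Option α),
      l.foldl (pvStep (fun x => (k x : Int))) acc = l.foldl (pvStep k) acc := by
  induction l with
  | nil => intro acc; rfl
  | cons x t ih =>
    intro acc
    simp only [List.foldl_cons]
    have hstep : pvStep (fun x => ((k x : Int))) acc x = pvStep k acc x := by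
      cases acc with
      | none => rfl
      | some m => simp [pvStep]
    rw [hstep]; exact ih _

lemma max?_key_natCast {α : Type} (l : List α) (k : α → Nat) :
    PySem.List.max? l (fun x => (k x : Int)) = PySem.List.max? l k := by
  rw [max?_eq_foldl_pvStep, max?_eq_foldl_pvStep]
  exact foldl_pvStep_natCast k l none

-- A's branchy counting step is the uniform `insert food (getD food 0 + 1)` step
lemma stepA_eq (d : PySem.Dict String Int) (food : String) :
    (if d.contains food = false then d.insert food 1
     else d.insert food (d.getD food 0 + 1)) = d.insert food (d.getD food 0 + 1) := by
  by_cases h : d.contains food = false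
  · rw [if_pos h, PySem.Dict.getD_of_not_contains d 0 h]; norm_num
  · rw [if_neg h]

-- ----- B-side machinery -----

-- the strict-improvement step of the loop, on explicit (value, count) pairs
def pairStep (b : String × Nat) (p : String × Nat) : String × Nat :=
  if p.2 > b.2 then p else b

lemma mem_of_mem_pvDedupFrom {α : Type} [DecidableEq α] (l : List α) :
    ∀ (s : List α) (a : α), a ∈ pvDedupFrom s l → a ∈ l := by
  induction l with
  | nil => intro s a h; simp [pvDedupFrom] at h
  | cons x t ih =>
    intro s a h
    simp only [pvDedupFrom] at h
    by_cases hx : x ∈ s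
    · rw [if_pos hx] at h; exact List.mem_cons_of_mem _ (ih s a h)
    · rw [if_neg hx] at h
      rcases List.mem_cons.1 h with h | h
      · exact h ▸ List.mem_cons_self
      · exact List.mem_cons_of_mem _ (ih (x :: s) a h)

-- filtering out an already-seen value does not change the dedup
lemma pvDedupFrom_filter_seen {α : Type} [DecidableEq α] (l : List α) :
    ∀ (s : List α) (h : α), h ∈ s →
      pvDedupFrom s (l.filter (fun f => f ≠ h)) = pvDedupFrom s l := by
  induction l with
  | nil => intro s h _; rfl
  | cons x t ih =>
    intro s h hs
    by_cases hxh : x = h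
    · subst hxh
      simp only [List.filter_cons, ne_eq, not_true_eq_false, decide_false, Bool.false_eq_true,
        if_false, pvDedupFrom, if_pos hs]
      exact ih s x hs
    · simp only [List.filter_cons, ne_eq, hxh, not_false_eq_true, decide_true, if_true,
        pvDedupFrom]
      by_cases hx : x ∈ s
      · rw [if_pos hx, if_pos hx]; exact ih s h hs
      · rw [if_neg hx, if_neg hx, ih (x :: s) h (List.mem_cons_of_mem _ hs)]

-- a seen value absent from the list can be dropped from the seen set
lemma pvDedupFrom_drop_seen {α : Type} [DecidableEq α] (l : List α) :
    ∀ (s : List α) (h : α), h ∉ l →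
      pvDedupFrom (h :: s) l = pvDedupFrom s l := by
  induction l with
  | nil => intro s h _; rfl
  | cons x t ih =>
    intro s h hnl
    have hxh : x ≠ h := fun e => hnl (e ▸ List.mem_cons_self)
    have hnt : h ∉ t := fun e => hnl (List.mem_cons_of_mem _ e)
    simp only [pvDedupFrom]
    by_cases hx : x ∈ s
    · rw [if_pos (List.mem_cons_of_mem _ hx), if_pos hx]; exact ih s h hnt
    · rw [if_neg (by simp [hxh, hx]), if_neg hx,
        pvDedupFrom_congr t (x :: h :: s) (h :: x :: s) (by intro a; simp; tauto),
        ih (x :: s) h hnt]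

-- count of the head = the length removed by filtering it out
lemma count_head_eq_sub (h : String) (l : List String) :
    l.count h = l.length - (l.filter (fun f => f ≠ h)).length := by
  induction l with
  | nil => rfl
  | cons x t ih =>
    by_cases hx : x = h
    · subst hx
      simp only [List.count_cons_self, List.filter_cons, ne_eq, not_true_eq_false,
        decide_false, Bool.false_eq_true, if_false, List.length_cons, ih]
      have := List.length_filter_le (fun f => decide ¬f = x) t
      omega
    · simp only [List.count_cons_of_ne hx, List.filter_cons, ne_eq, hx, not_false_eq_true,
        decide_true, if_true, List.length_cons, ih]
      have := List.length_filter_le (fun f => decide ¬f = h) t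
      omega

-- the loop equals the strict-improvement fold over the deduped (food, count) pairs
lemma pvBestLoop_eq_foldl_aux (n : Nat) :
    ∀ (fs : List String), fs.length ≤ n → ∀ (bf : String) (bc : Nat),
      pvBestLoop fs bf bc =
        (((pvDedupFrom [] fs).map (fun f => (f, fs.count f))).foldl pairStep (bf, bc)).1 := by
  induction n with
  | zero =>
    intro fs hlen bf bc
    have : fs = [] := List.eq_nil_of_length_eq_zero (Nat.le_zero.1 hlen)
    subst this
    simp [pvBestLoop, pvDedupFrom]
  | succ n ihn =>
    intro fs hlen bf bc
    match fs with
    | [] => simp [pvBestLoop, pvDedupFrom]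
    | h :: t =>
      set rest := t.filter (fun f => f ≠ h) with hrest_def
      have hrest : (h :: t).filter (fun f => f ≠ h) = rest := by
        simp [hrest_def]
      have hlen' : rest.length ≤ n := by
        have h1 := List.length_filter_le (fun f => decide ¬f = h) t
        simp only [List.length_cons] at hlen
        simp only [hrest_def, ne_eq]
        omega
      have hnotrest : h ∉ rest := by simp [hrest_def]
      -- dedup of h :: t is h followed by the dedup of the filtered rest
      have hded : pvDedupFrom [] (h :: t) = h :: pvDedupFrom [] rest := by
        simp only [pvDedupFrom, List.not_mem_nil, if_false]
        rw [← pvDedupFrom_filter_seen t [h] h List.mem_cons_self,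
          pvDedupFrom_drop_seen rest [] h hnotrest]
      -- counts of the surviving foods are unchanged by removing the head's copies
      have hcnt : ∀ f ∈ pvDedupFrom [] rest, (h :: t).count f = rest.count f := by
        intro f hf
        have hfr : f ∈ rest := mem_of_mem_pvDedupFrom rest [] f hf
        have hfh : f ≠ h := fun e => hnotrest (e ▸ hfr)
        rw [hrest_def]
        simp [List.count_filter, hfh, hfh.symm]
      have hmap : (pvDedupFrom [] rest).map (fun f => (f, (h :: t).count f))
          = (pvDedupFrom [] rest).map (fun f => (f, rest.count f)) :=
        List.map_congr_left (fun f hf => by rw [hcnt f hf])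
      have hc : (h :: t).length - ((h :: t).filter (fun f => f ≠ h)).length
          = (h :: t).count h := (count_head_eq_sub h (h :: t)).symm
      -- unfold one round of the loop
      conv_lhs => rw [pvBestLoop]
      rw [hrest] at hc ⊢
      rw [hc, hded]
      simp only [List.map_cons, List.foldl_cons]
      have hpair : pairStep (bf, bc) (h, (h :: t).count h)
          = if (h :: t).count h > bc then (h, (h :: t).count h) else (bf, bc) := by
        simp [pairStep]
      rw [hpair, hmap]
      by_cases hgt : (h :: t).count h > bc
      · rw [if_pos hgt, if_pos hgt, ihn rest hlen' h ((h :: t).count h)]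
      · rw [if_neg hgt, if_neg hgt, ihn rest hlen' bf bc]

lemma pvBestLoop_eq_foldl (fs : List String) (bf : String) (bc : Nat) :
    pvBestLoop fs bf bc =
      (((pvDedupFrom [] fs).map (fun f => (f, fs.count f))).foldl pairStep (bf, bc)).1 :=
  pvBestLoop_eq_foldl_aux fs.length fs le_rfl bf bc

-- a nonempty food is counted at least once
lemma count_pos_of_mem (f : String) (l : List String) (h : f ∈ l) : 0 < l.count f :=
  List.count_pos_iff.2 h

-- the option running-max fold and the pair strict-improvement fold agree
lemma foldl_pvStep_eq_pairStep (k : String → Nat) (l : List String) :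
    ∀ (m : String), ∃ c : String,
      l.foldl (pvStep k) (some m) = some c ∧
      (l.map (fun f => (f, k f))).foldl pairStep (m, k m) = (c, k c) := by
  induction l with
  | nil => intro m; exact ⟨m, rfl, rfl⟩
  | cons x t ih =>
    intro m
    simp only [List.foldl_cons, List.map_cons]
    have hstep : pvStep k (some m) x = some (if k m < k x then x else m) := by
      simp only [pvStep]; split_ifs <;> rfl
    have hpair : pairStep (m, k m) (x, k x)
        = ((if k m < k x then x else m), k (if k m < k x then x else m)) := by
      simp only [pairStep, gt_iff_lt]; split_ifs <;> rfl
    rw [hstep, hpair]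
    exact ih _
-- ===== VERDICT (by name: the statement is the Claim_ definition above) =====
theorem most_requested_by_name_spec : Claim_equal_most_requested_by_name := by
  intro name orders _ hpre
  unfold Spec_most_requested_by_name most_requested_by_name most_requested_by_name_alt
  -- A reduces to the first maximum (by count) over the matching foods
  have hstep : (fun (d : PySem.Dict String Int) order =>
      if PySem.Str.isIn name order = true then
        if d.contains (pvFood order) = false then d.insert (pvFood order) 1
        else d.insert (pvFood order) (d.getD (pvFood order) 0 + 1)
      else d)
    = (fun (d : PySem.Dict String Int) order =>
        if PySem.Str.isIn name order = true then
          d.insert (pvFood order) (d.getD (pvFood order) 0 + 1)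
        else d) := by
    funext d o
    by_cases h : PySem.Str.isIn name o = true
    · rw [if_pos h, if_pos h, stepA_eq]
    · rw [if_neg h, if_neg h]
  have hmap : ∀ (l : List String) (d : PySem.Dict String Int),
      l.foldl (fun d y => d.insert (pvFood y) (d.getD (pvFood y) 0 + 1)) d
        = (l.map pvFood).foldl (fun d f => d.insert f (d.getD f 0 + 1)) d := by
    intro l
    induction l with
    | nil => intro d; rfl
    | cons x t ih => intro d; simp only [List.foldl_cons, List.map_cons]; exact ih _
  have hupdate : ∀ (l : List String),
      PySem.Set.update ([] : List String) l = PySem.Set.ofList l := by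
    intro l; rw [PySem.Set.ofList_eq_foldl]; rfl
  simp only [hstep, ← List.foldl_filter, hmap,
    PySem.Dict.keys_foldl_insert, PySem.Dict.keys_empty, hupdate,
    PySem.Dict.getD_foldl_insert_add_one, PySem.Dict.getD_empty, zero_add,
    max?_ofList, max?_key_natCast]
  -- the matching foods are nonempty under Pre_
  set foods := (orders.filter (fun order => PySem.Str.isIn name order)).map pvFood with hfoods
  obtain ⟨hany, _⟩ := hpre
  obtain ⟨o, ho, hin⟩ := List.any_eq_true.1 hany
  have hne : foods ≠ [] := by
    have : o ∈ orders.filter (fun order => PySem.Str.isIn name order) :=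
      List.mem_filter.2 ⟨ho, hin⟩
    simp only [hfoods, ne_eq, List.map_eq_nil_iff]
    exact fun e => List.not_mem_nil (e ▸ this)
  match hfs : foods with
  | [] => exact absurd rfl hne
  | f0 :: t0 =>
    -- B side via the dedup/pair-fold characterisation
    rw [pvBestLoop_eq_foldl]
    have hget : PySem.List.pyGetD (f0 :: t0) 0 "" = f0 := by
      simp [PySem.List.pyGetD, PySem.List.pyGet?, PySem.List.pyIdx?]
    rw [hget]
    -- A side: option fold over the dedup
    have hded0 : pvDedupFrom [] (f0 :: t0) = f0 :: pvDedupFrom [f0] t0 := by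
      simp [pvDedupFrom]
    rw [max?_eq_foldl_pvStep,
      ← foldl_pvStep_pvDedupFrom (fun f => (f0 :: t0).count f) (f0 :: t0) [] none (by simp),
      hded0]
    simp only [List.foldl_cons, List.map_cons]
    have hstep0 : pvStep (fun f => (f0 :: t0).count f) none f0 = some f0 := rfl
    have hpos : 0 < (f0 :: t0).count f0 := count_pos_of_mem f0 _ List.mem_cons_self
    have hpair0 : pairStep (f0, 0) (f0, (f0 :: t0).count f0) = (f0, (f0 :: t0).count f0) := by
      simp [pairStep]
    rw [hstep0, hpair0]
    obtain ⟨c, hA, hB⟩ := foldl_pvStep_eq_pairStep (fun f => (f0 :: t0).count f)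
      (pvDedupFrom [f0] t0) f0
    rw [hA, hB]
    rfl
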